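-- pv_equiv track=rewrite | github.com/raboley/ado-mcp | ado/processes/utils.py | extract_process_properties
-- ===== SOURCE A (Python) =====
-- from typing import Any, Dict, List, Optional, TypeVar, Callable
--
-- def extract_process_properties(properties: List[Dict[str, Any]]) -> Dict[str, Optional[str]]:
--     """Extract process-related properties from project properties."""
--     process_info = {
--         "currentProcessTemplateId": None,
--         "originalProcessTemplateId": None,
--         "processTemplateName": None,
--         "processTemplateType": None,
--     }
--
--     property_mappings = {
--         "System.CurrentProcessTemplateId": "currentProcessTemplateId",
--         "System.OriginalProcessTemplateId": "originalProcessTemplateId",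
--         "System.Process Template": "processTemplateName",
--         "System.ProcessTemplateType": "processTemplateType",
--     }
--
--     for prop in properties:
--         name = prop.get("name", "")
--         if name in property_mappings:
--             process_info[property_mappings[name]] = prop.get("value")
--
--     return process_info
-- ===== SOURCE B (Python) =====
-- def extract_process_properties(properties):
--     """Extract process-related properties from project properties."""
--     property_mappings = {
--         "System.CurrentProcessTemplateId": "currentProcessTemplateId",
--         "System.OriginalProcessTemplateId": "originalProcessTemplateId",
--         "System.Process Template": "processTemplateName",
--         "System.ProcessTemplateType": "processTemplateType",
--     }
--
--     def find_last(src_name):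
--         # first match scanning from the back == last occurrence forward
--         for prop in reversed(properties):
--             if prop.get("name", "") == src_name:
--                 return prop.get("value")
--         return None
--
--     return {out_key: find_last(src) for src, out_key in property_mappings.items()}
-- ===== Notes on version B (the rewrite author's own statement) =====
-- stated objective: alternative
-- what changed: B replaces A's single forward pass that mutates a pre-seeded result dict with four independent backward searches: for each mapping entry it scans reversed(properties) and returns the first match's value (first-from-back = last-forward, so duplicates and missing names resolve identically).
import Mathlib
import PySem

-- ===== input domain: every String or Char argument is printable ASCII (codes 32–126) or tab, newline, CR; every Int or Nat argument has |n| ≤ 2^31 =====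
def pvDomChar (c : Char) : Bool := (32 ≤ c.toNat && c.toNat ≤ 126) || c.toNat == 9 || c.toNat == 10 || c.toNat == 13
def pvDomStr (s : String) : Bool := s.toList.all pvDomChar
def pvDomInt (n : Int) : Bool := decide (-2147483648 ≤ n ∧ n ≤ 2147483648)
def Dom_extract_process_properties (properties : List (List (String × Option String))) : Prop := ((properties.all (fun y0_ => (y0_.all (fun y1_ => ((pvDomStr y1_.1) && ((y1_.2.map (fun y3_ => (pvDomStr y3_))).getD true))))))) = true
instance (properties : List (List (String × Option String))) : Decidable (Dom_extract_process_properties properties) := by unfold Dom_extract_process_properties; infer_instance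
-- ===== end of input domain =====

-- B replaces A's single forward pass mutating a pre-seeded result dict with four independent
-- backward searches (first match over reversed(properties) per mapping key); same return value.

-- shared helper: Python dict.get on the input association lists (first match)
def pvGet (d : List (String × Option String)) (k : String) : Option (Option String) :=
  (d.find? (fun p => p.1 == k)).map (·.2)

-- prop.get("name", "")  (the stored value may itself be None)
def pvName (p : List (String × Option String)) : Option String :=
  (pvGet p "name").getD (some "")

-- prop.get("value")
def pvValue (p : List (String × Option String)) : Option String :=
  (pvGet p "value").join

-- ===== PORT A =====
def extract_process_properties (properties : List (List (String × Option String))) : List (String × Option String) :=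
  let process_info : PySem.Dict String (Option String) :=
    ((((PySem.Dict.empty.insert "currentProcessTemplateId" none).insert
        "originalProcessTemplateId" none).insert
        "processTemplateName" none).insert
        "processTemplateType" none)
  let property_mappings : PySem.Dict String String :=
    ((((PySem.Dict.empty.insert "System.CurrentProcessTemplateId" "currentProcessTemplateId").insert
        "System.OriginalProcessTemplateId" "originalProcessTemplateId").insert
        "System.Process Template" "processTemplateName").insert
        "System.ProcessTemplateType" "processTemplateType")
  let final := properties.foldl (fun d prop =>
      match pvName prop with
      | some n =>
        match property_mappings.get? n with   -- 'name in property_mappings' + lookup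
        | some outk => d.insert outk (pvValue prop)
        | none => d
      | none => d) process_info               -- name = None is never in the mappings
  final.items

-- ===== PORT B =====
def pvMappingList : List (String × String) :=
  [("System.CurrentProcessTemplateId", "currentProcessTemplateId"),
   ("System.OriginalProcessTemplateId", "originalProcessTemplateId"),
   ("System.Process Template", "processTemplateName"),
   ("System.ProcessTemplateType", "processTemplateType")]

-- find_last: first match scanning the reversed list, else None
def pvFindLast (properties : List (List (String × Option String))) (src : String) : Option String :=
  match properties.reverse.find? (fun p => pvName p == some src) with
  | some p => pvValue p
  | none => none

def extract_process_properties_alt (properties : List (List (String × Option String))) : List (String × Option String) :=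
  pvMappingList.map (fun m => (m.2, pvFindLast properties m.1))

-- ===== PRECONDITION & SPEC =====
def Spec_extract_process_properties (properties : List (List (String × Option String))) (out : List (String × Option String)) : Prop := out = extract_process_properties_alt properties
instance (properties : List (List (String × Option String))) (out : List (String × Option String)) : Decidable (Spec_extract_process_properties properties out) := by unfold Spec_extract_process_properties; infer_instance

-- ===== CLAIM (what is proved, stated in full; the proofs are below) =====
def Claim_equal_extract_process_properties : Prop := ∀ (properties : List (List (String × Option String))), Dom_extract_process_properties properties → Spec_extract_process_properties properties (extract_process_properties properties)

-- ===== LEMMAS AND PROOFS =====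

-- A's result dict, as a function of its four slot values
def pvQuad (a1 a2 a3 a4 : Option String) : PySem.Dict String (Option String) :=
  PySem.Dict.mk [("currentProcessTemplateId", a1), ("originalProcessTemplateId", a2),
                 ("processTemplateName", a3), ("processTemplateType", a4)]

-- per-slot forward accumulation (last write wins)
def pvSlot (ps : List (List (String × Option String))) (s : String) (a : Option String) : Option String :=
  ps.foldl (fun a p => if pvName p = some s then pvValue p else a) a

-- A's step on the quad dict
def pvStepA (d : PySem.Dict String (Option String)) (prop : List (String × Option String)) :
    PySem.Dict String (Option String) :=
  match pvName prop with
  | some n =>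
    match (((((PySem.Dict.empty.insert "System.CurrentProcessTemplateId" "currentProcessTemplateId").insert
        "System.OriginalProcessTemplateId" "originalProcessTemplateId").insert
        "System.Process Template" "processTemplateName").insert
        "System.ProcessTemplateType" "processTemplateType") : PySem.Dict String String).get? n with
    | some outk => d.insert outk (pvValue prop)
    | none => d
  | none => d

lemma pvStepA_quad (a1 a2 a3 a4 : Option String) (p : List (String × Option String)) :
    pvStepA (pvQuad a1 a2 a3 a4) p =
      pvQuad (if pvName p = some "System.CurrentProcessTemplateId" then pvValue p else a1)
             (if pvName p = some "System.OriginalProcessTemplateId" then pvValue p else a2)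
             (if pvName p = some "System.Process Template" then pvValue p else a3)
             (if pvName p = some "System.ProcessTemplateType" then pvValue p else a4) := by
  rcases h : pvName p with _ | n
  · simp [pvStepA, h]
  · simp only [pvStepA, h]
    by_cases h1 : n = "System.CurrentProcessTemplateId"
    · subst h1; rfl
    · by_cases h2 : n = "System.OriginalProcessTemplateId"
      · subst h2; rfl
      · by_cases h3 : n = "System.Process Template"
        · subst h3; rfl
        · by_cases h4 : n = "System.ProcessTemplateType"
          · subst h4; rfl
          · simp [PySem.Dict.get?_insert, h1, h2, h3, h4, PySem.Dict.get?_empty]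

lemma pv_loopA (ps : List (List (String × Option String))) (a1 a2 a3 a4 : Option String) :
    ps.foldl pvStepA (pvQuad a1 a2 a3 a4)
      = pvQuad (pvSlot ps "System.CurrentProcessTemplateId" a1)
               (pvSlot ps "System.OriginalProcessTemplateId" a2)
               (pvSlot ps "System.Process Template" a3)
               (pvSlot ps "System.ProcessTemplateType" a4) := by
  induction ps generalizing a1 a2 a3 a4 with
  | nil => simp [pvSlot]
  | cons p ps ih =>
    simp only [List.foldl_cons, pvStepA_quad, ih, pvSlot]

-- forward last-write-wins equals first match from the back
lemma pvSlot_eq_findLast (ps : List (List (String × Option String))) (s : String) (a : Option String) :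
    pvSlot ps s a
      = (match ps.reverse.find? (fun p => pvName p == some s) with
         | some p => pvValue p
         | none => a) := by
  induction ps generalizing a with
  | nil => simp [pvSlot]
  | cons p ps ih =>
    simp only [pvSlot, List.foldl_cons] at *
    rw [ih]
    simp only [List.reverse_cons, List.find?_append]
    cases h : ps.reverse.find? (fun p => pvName p == some s) with
    | some q => simp
    | none =>
      simp only [Option.none_or, List.find?_singleton]
      by_cases he : pvName p = some s
      · simp [he]
      · have : (pvName p == some s) = false := by
          simp [he]
        simp [he, this]

theorem pv_main (ps : List (List (String × Option String))) :
    extract_process_properties ps = extract_process_properties_alt ps := by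
  have hA : extract_process_properties ps = (ps.foldl pvStepA (pvQuad none none none none)).items := rfl
  rw [hA, pv_loopA]
  show [("currentProcessTemplateId", pvSlot ps "System.CurrentProcessTemplateId" none),
        ("originalProcessTemplateId", pvSlot ps "System.OriginalProcessTemplateId" none),
        ("processTemplateName", pvSlot ps "System.Process Template" none),
        ("processTemplateType", pvSlot ps "System.ProcessTemplateType" none)] = _
  simp only [pvSlot_eq_findLast]
  rfl

-- ===== VERDICT (by name: the statement is the Claim_ definition above) =====
theorem extract_process_properties_spec : Claim_equal_extract_process_properties := by
  intro ps _
  unfold Spec_extract_process_properties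
  exact pv_main ps
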